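-- pv_equiv track=rewrite | github.com/callistopan/My-leetcode-solutions | 2216-minimum-deletions-to-make-array-beautiful/2216-minimum-deletions-to-make-array-beautiful.py | minDeletion
-- ===== SOURCE A (Python) =====
-- from typing import List
--
-- def minDeletion(nums: List[int]) -> int:
--     stack=[]
--
--     for i in range(len(nums)):
--
--         if not stack:
--
--             stack.append(nums[i])
--
--         elif (len(stack)%2==0 and nums[i]==stack[-1]) or nums[i]!= stack[-1]:
--
--             stack.append(nums[i])
--
--     if len(stack)%2==1:
--         return len(nums)-len(stack)+1
--
--     return len(nums)-len(stack)
-- ===== SOURCE B (Python) =====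
-- from typing import List
--
-- def minDeletion(nums: List[int]) -> int:
--     # Two-pointer scan counting deletions directly, no kept-list materialised.
--     res = 0
--     i = 0
--     n = len(nums)
--     while i < n - 1:
--         if nums[i] == nums[i + 1]:
--             res += 1
--             i += 1
--         else:
--             i += 2
--     if (n - res) % 2:
--         res += 1
--     return res
-- ===== Notes on version B (the rewrite author's own statement) =====
-- stated objective: simpler
-- what changed: Replaces A's stack-building pass (appending kept elements and comparing against the stored stack top) with a stride-varying two-pointer scan over the original array that maintains only a deletion counter, fixing parity at the end from (n - res).
import Mathlib
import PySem

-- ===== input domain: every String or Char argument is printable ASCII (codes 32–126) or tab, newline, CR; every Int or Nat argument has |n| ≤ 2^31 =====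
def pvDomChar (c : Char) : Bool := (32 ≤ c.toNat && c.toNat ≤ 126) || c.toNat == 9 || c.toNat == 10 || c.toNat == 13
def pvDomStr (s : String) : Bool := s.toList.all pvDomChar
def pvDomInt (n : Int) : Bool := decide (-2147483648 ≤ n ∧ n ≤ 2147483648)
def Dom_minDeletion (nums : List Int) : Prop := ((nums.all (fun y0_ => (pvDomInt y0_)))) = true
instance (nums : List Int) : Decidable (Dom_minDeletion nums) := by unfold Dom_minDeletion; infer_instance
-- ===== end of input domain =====

-- B replaces A's kept-element stack with a counter-only two-pointer scan; objective: simpler (O(1) extra space).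

-- ===== PORT A =====
-- one step of A's loop body: push nums[i] when the stack is empty, or when
-- (len(stack)%2==0 and nums[i]==stack[-1]) or nums[i]!=stack[-1]
-- stack[-1]: in the branch where it is read the stack is nonempty, so it is exactly getLast?
def minDeletionStep (stack : List Int) (x : Int) : List Int :=
  if stack = [] then stack ++ [x]
  else
    let top := stack.getLast?.getD 0
    if (stack.length % 2 == 0 && x == top) || x != top then stack ++ [x]
    else stack

def minDeletion (nums : List Int) : Int :=
  let stack := nums.foldl minDeletionStep []
  if stack.length % 2 == 1 then (nums.length : Int) - stack.length + 1
  else (nums.length : Int) - stack.length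

-- ===== PORT B =====
-- the while loop of Source B: compare nums[i] with nums[i+1]; equal → count a deletion and
-- advance by 1, different → advance by 2 (indexing rendered as list pattern matching)
def minDeletionLoop : List Int → Int
  | a :: b :: rest => if a = b then 1 + minDeletionLoop (b :: rest) else minDeletionLoop rest
  | _ => 0

def minDeletion_alt (nums : List Int) : Int :=
  let res := minDeletionLoop nums
  if ((nums.length : Int) - res) % 2 == 1 then res + 1 else res

-- ===== PRECONDITION & SPEC =====
def Spec_minDeletion (nums : List Int) (out : Int) : Prop := out = minDeletion_alt nums
instance (nums : List Int) (out : Int) : Decidable (Spec_minDeletion nums out) := by unfold Spec_minDeletion; infer_instance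

-- ===== CLAIM (what is proved, stated in full; the proofs are below) =====
def Claim_equal_minDeletion : Prop := ∀ (nums : List Int), Dom_minDeletion nums → Spec_minDeletion nums (minDeletion nums)

-- ===== LEMMAS AND PROOFS =====

lemma step_even (st : List Int) (x : Int) (h : st.length % 2 = 0) :
    minDeletionStep st x = st ++ [x] := by
  unfold minDeletionStep
  by_cases he : st = []
  · simp [he]
  · simp only [if_neg he]
    by_cases hx : x = st.getLast?.getD 0
    · simp [hx, h]
    · simp [hx]

lemma step_odd (st : List Int) (x a : Int) (hl : st.getLast? = some a) (h : st.length % 2 = 1) :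
    minDeletionStep st x = if x = a then st else st ++ [x] := by
  have he : st ≠ [] := by rintro rfl; simp at hl
  unfold minDeletionStep
  simp only [if_neg he, hl, Option.getD_some]
  by_cases hx : x = a
  · simp [hx, h]
  · simp [hx]

lemma loop_cons_self (a : Int) (l : List Int) :
    minDeletionLoop (a :: a :: l) = 1 + minDeletionLoop (a :: l) := by
  simp [minDeletionLoop]

lemma loop_cons_ne (a b : Int) (l : List Int) (h : a ≠ b) :
    minDeletionLoop (a :: b :: l) = minDeletionLoop l := by
  simp [minDeletionLoop, h]

-- the key invariant: the final stack length is n minus the deletions counted by B's loop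
lemma key : ∀ n (l : List Int), l.length = n →
    (∀ st : List Int, st.length % 2 = 0 →
      ((l.foldl minDeletionStep st).length : Int) = st.length + l.length - minDeletionLoop l) ∧
    (∀ a : Int, ∀ st : List Int, st.getLast? = some a → st.length % 2 = 1 →
      ((l.foldl minDeletionStep st).length : Int) = st.length + l.length - minDeletionLoop (a :: l)) := by
  intro n
  induction n using Nat.strong_induction_on with
  | _ n ih =>
    intro l hlen
    constructor
    · intro st hst
      match l, hlen with
      | [], _ => simp [minDeletionLoop]
      | x :: rest, hlen =>
        have hr : rest.length < n := by
          simp only [List.length_cons] at hlen; omega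
        have hstep : minDeletionStep st x = st ++ [x] := step_even st x hst
        have hlast : (st ++ [x]).getLast? = some x := by simp
        have hodd : (st ++ [x]).length % 2 = 1 := by
          simp only [List.length_append, List.length_cons, List.length_nil]; omega
        have := ((ih rest.length hr rest rfl).2) x (st ++ [x]) hlast hodd
        simp only [List.foldl_cons, hstep, this, List.length_append, List.length_cons]
        push_cast
        simp
        ring
    · intro a st hlast hst
      match l, hlen with
      | [], _ => simp [minDeletionLoop]
      | x :: rest, hlen =>
        have hr : rest.length < n := by
          simp only [List.length_cons] at hlen; omega
        by_cases hx : x = a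
        · have hstep : minDeletionStep st x = st := by rw [step_odd st x a hlast hst]; simp [hx]
          have := ((ih rest.length hr rest rfl).2) a st hlast hst
          subst hx
          simp only [List.foldl_cons, hstep, this, loop_cons_self, List.length_cons]
          push_cast
          ring
        · have hstep : minDeletionStep st x = st ++ [x] := by
            rw [step_odd st x a hlast hst]; simp [hx]
          have heven : (st ++ [x]).length % 2 = 0 := by
            simp only [List.length_append, List.length_cons, List.length_nil]; omega
          have := ((ih rest.length hr rest rfl).1) (st ++ [x]) heven
          have hne : a ≠ x := fun h => hx h.symm
          simp only [List.foldl_cons, hstep, this, loop_cons_ne a x rest hne,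
            List.length_append, List.length_cons]
          push_cast
          simp
          ring

lemma stack_length (nums : List Int) :
    ((nums.foldl minDeletionStep []).length : Int) = nums.length - minDeletionLoop nums := by
  have := ((key nums.length nums rfl).1) [] (by simp)
  simpa using this

lemma final_arith (n S : Nat) (r : Int) (h : (S : Int) = n - r) :
    (if S % 2 == 1 then (n : Int) - S + 1 else (n : Int) - S) =
    (if ((n : Int) - r) % 2 == 1 then r + 1 else r) := by
  by_cases hs : S % 2 = 1
  · have h2 : ((n : Int) - r) % 2 = 1 := by omega
    simp [hs, h2]; omega
  · have h1 : S % 2 = 0 := by omega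
    have h2 : ((n : Int) - r) % 2 = 0 := by omega
    simp [h1, h2]; omega

-- ===== VERDICT (by name: the statement is the Claim_ definition above) =====
theorem minDeletion_spec : Claim_equal_minDeletion := by
  intro nums _
  unfold Spec_minDeletion minDeletion minDeletion_alt
  exact final_arith nums.length (nums.foldl minDeletionStep []).length (minDeletionLoop nums)
    (stack_length nums)
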